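-- pv_equiv track=rewrite | github.com/MikolajSzawerda/Neural-network | nn_evolution.py | calculate_slice_points
-- ===== SOURCE A (Python) =====
-- from collections import namedtuple
--
-- MatrixView = namedtuple("MatrixView", "w_a w_b w_col w_row b_a b_b")
--
-- def calculate_slice_points(structure, bias_slice_point):
--     slice_point_weights = 0
--     previous_layer = structure[0]
--     slice_points = []
--     for layer in structure[1:]:
--         slice_points.append(MatrixView(slice_point_weights,
--                                        slice_point_weights + layer * previous_layer,
--                                        previous_layer,
--                                        layer,
--                                        bias_slice_point,
--                                        bias_slice_point + layer))
--         slice_point_weights += layer * previous_layer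
--         bias_slice_point += layer
--         previous_layer = layer
--     return slice_points
-- ===== SOURCE B (Python) =====
-- from collections import namedtuple
-- from itertools import accumulate
--
-- MatrixView = namedtuple("MatrixView", "w_a w_b w_col w_row b_a b_b")
--
-- def calculate_slice_points(structure, bias_slice_point):
--     pairs = list(zip(structure, structure[1:]))
--     wsizes = [layer * prev for prev, layer in pairs]
--     bsizes = [layer for prev, layer in pairs]
--     wstarts = list(accumulate([0] + wsizes))
--     bstarts = list(accumulate([bias_slice_point] + bsizes))
--     return [MatrixView(ws, ws + w, prev, layer, bs, bs + layer)
--             for (prev, layer), ws, w, bs in zip(pairs, wstarts, wsizes, bstarts)]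
-- ===== Notes on version B (the rewrite author's own statement) =====
-- stated objective: alternative
-- what changed: B replaces the loop threading two running accumulators (weight offset, bias offset) with a size-list + prefix-sum decomposition: block sizes from zip(structure, structure[1:]) and start offsets from itertools.accumulate, assembled in one comprehension.
import Mathlib
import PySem

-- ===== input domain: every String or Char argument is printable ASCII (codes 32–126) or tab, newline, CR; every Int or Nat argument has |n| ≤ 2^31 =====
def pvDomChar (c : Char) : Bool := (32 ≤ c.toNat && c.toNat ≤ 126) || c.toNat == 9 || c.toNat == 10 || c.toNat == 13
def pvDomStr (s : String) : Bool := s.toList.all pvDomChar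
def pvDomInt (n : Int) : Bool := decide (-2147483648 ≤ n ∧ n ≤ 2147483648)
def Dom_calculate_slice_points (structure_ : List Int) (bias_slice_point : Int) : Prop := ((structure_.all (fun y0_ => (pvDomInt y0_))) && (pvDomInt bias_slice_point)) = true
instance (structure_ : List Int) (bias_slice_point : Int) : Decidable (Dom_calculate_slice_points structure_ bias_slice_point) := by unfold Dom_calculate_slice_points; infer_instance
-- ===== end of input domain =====

-- B replaces A's accumulator-threading loop by a size-list + prefix-sum (scanl) decomposition; same cost, different structure.


-- ===== PORT A =====
-- A's loop: state (slice_points, slice_point_weights, bias_slice_point, previous_layer), append per layer.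
def calculate_slice_points (structure_ : List Int) (bias_slice_point : Int) : List (Int × Int × Int × Int × Int × Int) :=
  match PySem.List.pyGet? structure_ 0 with
  | none => []   -- IndexError in Python: excluded by Pre_
  | some prev0 =>
    let st := (PySem.List.slice structure_ (some 1) none).foldl
      (fun (st : List (Int × Int × Int × Int × Int × Int) × Int × Int × Int) layer =>
        let (acc, spw, bsp, prev) := st
        (acc ++ [(spw, spw + layer * prev, prev, layer, bsp, bsp + layer)],
         spw + layer * prev, bsp + layer, layer))
      ([], 0, bias_slice_point, prev0)
    st.1

-- ===== PORT B =====
-- itertools.accumulate xs (default op +): cumulative sums, same length as xs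
def pyAccumulate (xs : List Int) : List Int :=
  match xs with
  | [] => []
  | h :: t => t.scanl (· + ·) h

def calculate_slice_points_alt (structure_ : List Int) (bias_slice_point : Int) : List (Int × Int × Int × Int × Int × Int) :=
  let pairs := structure_.zip (PySem.List.slice structure_ (some 1) none)
  let wsizes := pairs.map (fun pl => pl.2 * pl.1)
  let bsizes := pairs.map (fun pl => pl.2)
  let wstarts := pyAccumulate (0 :: wsizes)
  let bstarts := pyAccumulate (bias_slice_point :: bsizes)
  (pairs.zip (wstarts.zip (wsizes.zip bstarts))).map
    (fun x => (x.2.1, x.2.1 + x.2.2.1, x.1.1, x.1.2, x.2.2.2, x.2.2.2 + x.1.2))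

-- ===== PRECONDITION & SPEC =====
-- Pre_ excludes only the empty structure, on which A raises IndexError.
def Pre_calculate_slice_points (structure_ : List Int) (bias_slice_point : Int) : Prop := structure_ ≠ []
instance (structure_ : List Int) (bias_slice_point : Int) : Decidable (Pre_calculate_slice_points structure_ bias_slice_point) := by unfold Pre_calculate_slice_points; infer_instance
def pvWitness_calculate_slice_points : List Int × Int := ([3, 4, 2], 5)

def Spec_calculate_slice_points (structure_ : List Int) (bias_slice_point : Int) (out : List (Int × Int × Int × Int × Int × Int)) : Prop := out = calculate_slice_points_alt structure_ bias_slice_point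
instance (structure_ : List Int) (bias_slice_point : Int) (out : List (Int × Int × Int × Int × Int × Int)) : Decidable (Spec_calculate_slice_points structure_ bias_slice_point out) := by unfold Spec_calculate_slice_points; infer_instance

-- ===== CLAIM (what is proved, stated in full; the proofs are below) =====
def Claim_equal_calculate_slice_points : Prop := ∀ (structure_ : List Int) (bias_slice_point : Int), Dom_calculate_slice_points structure_ bias_slice_point → Pre_calculate_slice_points structure_ bias_slice_point → Spec_calculate_slice_points structure_ bias_slice_point (calculate_slice_points structure_ bias_slice_point)

-- ===== LEMMAS AND PROOFS =====

-- canonical form both ports reduce to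
def viewsOf : List (Int × Int) → Int → Int → List (Int × Int × Int × Int × Int × Int)
  | [], _, _ => []
  | (p, l) :: t, sw, sb => (sw, sw + l * p, p, l, sb, sb + l) :: viewsOf t (sw + l * p) (sb + l)

theorem foldA_eq_viewsOf (layers : List Int) :
    ∀ (prev sw sb : Int) (acc : List (Int × Int × Int × Int × Int × Int)),
    (layers.foldl
      (fun (st : List (Int × Int × Int × Int × Int × Int) × Int × Int × Int) layer =>
        let (acc, spw, bsp, prev) := st
        (acc ++ [(spw, spw + layer * prev, prev, layer, bsp, bsp + layer)],
         spw + layer * prev, bsp + layer, layer))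
      (acc, sw, sb, prev)).1
    = acc ++ viewsOf ((prev :: layers).zip layers) sw sb := by
  induction layers with
  | nil => intro prev sw sb acc; simp [viewsOf]
  | cons l t ih =>
    intro prev sw sb acc
    simp only [List.foldl_cons]
    rw [ih]
    simp [viewsOf]

theorem altB_eq_viewsOf (pairs : List (Int × Int)) :
    ∀ (sw sb : Int),
    (pairs.zip ((pairs.map (fun pl => pl.2 * pl.1)).scanl (· + ·) sw |>.zip
      ((pairs.map (fun pl => pl.2 * pl.1)).zip ((pairs.map (fun pl => pl.2)).scanl (· + ·) sb)))).map
      (fun x => (x.2.1, x.2.1 + x.2.2.1, x.1.1, x.1.2, x.2.2.2, x.2.2.2 + x.1.2))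
    = viewsOf pairs sw sb := by
  induction pairs with
  | nil => intro sw sb; simp [viewsOf]
  | cons pl t ih =>
    intro sw sb
    obtain ⟨p, l⟩ := pl
    simp only [List.map_cons, List.scanl_cons, List.zip_cons_cons, viewsOf]
    rw [← ih (sw + l * p) (sb + l)]

theorem ports_agree (p0 : Int) (rest : List Int) (bsp : Int) :
    calculate_slice_points (p0 :: rest) bsp = calculate_slice_points_alt (p0 :: rest) bsp := by
  unfold calculate_slice_points calculate_slice_points_alt pyAccumulate
  rw [PySem.List.slice_from_one]
  simp only [PySem.List.pyGet?_zero_cons, List.tail_cons]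
  rw [foldA_eq_viewsOf, altB_eq_viewsOf]
  simp

-- ===== VERDICT (by name: the statement is the Claim_ definition above) =====
theorem calculate_slice_points_spec : Claim_equal_calculate_slice_points := by
  intro structure_ bsp _ hpre
  unfold Spec_calculate_slice_points
  cases structure_ with
  | nil => exact absurd rfl hpre
  | cons p0 rest => exact ports_agree p0 rest bsp
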